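-- pv_equiv track=rewrite | github.com/austinProGit/scheduler | src/schedule_inspector.py | junior_with_1000_level_courses
-- ===== SOURCE A (Python) =====
-- def schedule_length(schedule):
--     return len(schedule)
--
-- def semester_type_sequence(schedule):
--     SEMESTER_TYPE_SUCCESSOR = {'Fa': 'Sp', 'Sp': 'Su', 'Su': 'Fa'}
--     sequence = None
--     previous_season = 'Su'
--     if schedule_length(schedule) > 0:
--         sequence = []
--         for semester in schedule:
--             sequence.append(SEMESTER_TYPE_SUCCESSOR[previous_season])
--             previous_season = SEMESTER_TYPE_SUCCESSOR[previous_season]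
--     return sequence
--
-- def last_semester_type(schedule):
--     semester_types = semester_type_sequence(schedule)
--     if semester_types != None:
--         return semester_types[-1]
--     else: return None
--
-- def senior_interval(schedule):
--     last_type = last_semester_type(schedule)
--     if last_type == 'Su':
--         return -3
--     if last_type == 'Sp':
--         return -2
--     if last_type == 'Fa':
--         return -1
--
-- def senior_year_semesters_list(schedule):
--     if schedule == None or schedule == [] or schedule == [[]]:
--         return None
--     senior_semesters = []
--     index = senior_interval(schedule)
--     for i in range(index, 0):
--         for semester in schedule[i]:
--             senior_semesters.append(semester)
--     return senior_semesters
--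
-- def junior_interval(schedule):
--     last_type = last_semester_type(schedule)
--     junior_schedule = schedule
--     length = schedule_length(schedule)
--     if last_type == 'Su' and length > 3:
--         return junior_schedule[:length-3]
--     if last_type == 'Sp' and length > 2:
--         return junior_schedule[:length-2]
--     if last_type == 'Fa' and length > 1:
--         return junior_schedule[:length-1]
--
-- def junior_year_semesters_list(schedule):
--     junior_semesters = schedule
--     if junior_semesters != None and schedule_length(schedule) > 0:
--         junior_semesters = junior_interval(schedule)
--         junior_semesters = senior_year_semesters_list(junior_semesters)
--     return junior_semesters
--
-- def junior_with_1000_level_courses(schedule):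
--     found = False
--     junior_year = junior_year_semesters_list(schedule)
--     if junior_year != None:
--         for course in junior_year:
--             if ' 1' in course:
--                 found = True
--                 break
--     return found
-- ===== SOURCE B (Python) =====
-- def junior_with_1000_level_courses(schedule):
--     if not schedule:
--         return False
--     n = len(schedule)
--     senior = 3 if n % 3 == 0 else (2 if n % 3 == 2 else 1)
--     junior_end = n - senior
--     if junior_end < 3:
--         return False
--     return any(' 1' in course
--                for semester in schedule[junior_end - 3:junior_end]
--                for course in semester)
-- ===== Notes on version B (the rewrite author's own statement) =====
-- stated objective: simpler
-- what changed: B replaces A's five-helper chain (semester-type successor dict, last-semester-type, senior/junior interval slicing, flattening loops) with direct modular arithmetic on len(schedule) to find the three junior semesters and a single any() scan over them.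
import Mathlib
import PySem

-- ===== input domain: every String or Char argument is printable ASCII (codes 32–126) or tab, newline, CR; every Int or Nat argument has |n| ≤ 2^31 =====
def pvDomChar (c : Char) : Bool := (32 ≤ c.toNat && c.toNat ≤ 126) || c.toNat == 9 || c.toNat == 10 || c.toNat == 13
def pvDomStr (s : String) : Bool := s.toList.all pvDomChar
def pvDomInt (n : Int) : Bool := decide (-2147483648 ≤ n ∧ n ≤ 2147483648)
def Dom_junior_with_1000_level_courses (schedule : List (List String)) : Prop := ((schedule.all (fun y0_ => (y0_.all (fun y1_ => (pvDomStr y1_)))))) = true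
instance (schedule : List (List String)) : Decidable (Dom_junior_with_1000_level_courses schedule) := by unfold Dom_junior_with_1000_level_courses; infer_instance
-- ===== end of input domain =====

-- B replaces A's helper chain (semester-type sequence, last-type, intervals) by direct
-- modular arithmetic on the schedule length plus one scan of the three junior semesters (simpler).


-- ===== PORT A =====
-- SEMESTER_TYPE_SUCCESSOR dict; on every reachable key ('Su','Fa','Sp') the lookup hits,
-- so the `.getD ""` default of the transliterated `d[k]` is never used.
def pvSuccDict : PySem.Dict String String :=
  PySem.Dict.insert (PySem.Dict.insert (PySem.Dict.insert (PySem.Dict.empty) "Fa" "Sp") "Sp" "Su") "Su" "Fa"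

-- the body of A's for-loop in semester_type_sequence (state: (sequence, previous_season))
def pvStep (st : List String × String) (_x : List String) : List String × String :=
  let nxt := (PySem.Dict.get? pvSuccDict st.2).getD ""
  (st.1 ++ [nxt], nxt)

def schedule_length (schedule : List (List String)) : Int := (schedule.length : Int)

def semester_type_sequence (schedule : List (List String)) : Option (List String) :=
  if schedule_length schedule > 0 then
    some (schedule.foldl pvStep ([], "Su")).1
  else none

def last_semester_type (schedule : List (List String)) : Option String :=
  match semester_type_sequence schedule with
  | some seq => PySem.List.pyGet? seq (-1)  -- seq is nonempty here, so this is Python's seq[-1]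
  | none => none

def senior_interval (schedule : List (List String)) : Option Int :=
  let last_type := last_semester_type schedule
  if last_type == some "Su" then some (-3)
  else if last_type == some "Sp" then some (-2)
  else if last_type == some "Fa" then some (-1)
  else none   -- Python falls off the end: implicit None

-- called by A only with junior_interval's result, hence Option
def senior_year_semesters_list (schedule : Option (List (List String))) : Option (List String) :=
  if schedule == none || schedule == some [] || schedule == some [[]] then none
  else
    let s := schedule.getD []
    match senior_interval s with
    | some index =>
        some ((PySem.List.pyRange index 0 1).foldl
          (fun acc i => acc ++ (PySem.List.pyGet? s i).getD []) [])
    | none => none  -- Python would raise TypeError in range(None, 0); unreachable: s ≠ [] here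

def junior_interval (schedule : List (List String)) : Option (List (List String)) :=
  let last_type := last_semester_type schedule
  let length := schedule_length schedule
  if last_type == some "Su" && length > 3 then
    some (PySem.List.slice schedule none (some (length - 3)))
  else if last_type == some "Sp" && length > 2 then
    some (PySem.List.slice schedule none (some (length - 2)))
  else if last_type == some "Fa" && length > 1 then
    some (PySem.List.slice schedule none (some (length - 1)))
  else none

def junior_year_semesters_list (schedule : List (List String)) : Option (List String) :=
  if schedule_length schedule > 0 then
    senior_year_semesters_list (junior_interval schedule)
  else some []  -- Python returns schedule itself, which is [] here; the caller only iterates it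

def junior_with_1000_level_courses (schedule : List (List String)) : Bool :=
  match junior_year_semesters_list schedule with
  | none => false
  | some junior_year => junior_year.any (fun course => PySem.Str.isIn " 1" course)

-- ===== PORT B =====
def junior_with_1000_level_courses_alt (schedule : List (List String)) : Bool :=
  if schedule.isEmpty then false
  else
    let n : Int := (schedule.length : Int)
    let r := PySem.Int.mod n 3
    let senior : Int := if r == 0 then 3 else if r == 2 then 2 else 1
    let junior_end := n - senior
    if junior_end < 3 then false
    else
      (PySem.List.slice schedule (some (junior_end - 3)) (some junior_end)).any
        (fun semester => semester.any (fun course => PySem.Str.isIn " 1" course))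

-- ===== PRECONDITION & SPEC =====
def Spec_junior_with_1000_level_courses (schedule : List (List String)) (out : Bool) : Prop := out = junior_with_1000_level_courses_alt schedule
instance (schedule : List (List String)) (out : Bool) : Decidable (Spec_junior_with_1000_level_courses schedule out) := by unfold Spec_junior_with_1000_level_courses; infer_instance

-- ===== CLAIM (what is proved, stated in full; the proofs are below) =====
def Claim_equal_junior_with_1000_level_courses : Prop := ∀ (schedule : List (List String)), Dom_junior_with_1000_level_courses schedule → Spec_junior_with_1000_level_courses schedule (junior_with_1000_level_courses schedule)

-- ===== LEMMAS AND PROOFS =====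

-- the season after k semesters (pvSeason 0 = 'Su' is the initial previous_season)
def pvSeason (k : Nat) : String := if k % 3 == 0 then "Su" else if k % 3 == 1 then "Fa" else "Sp"

lemma pvSucc_season (k : Nat) :
    (PySem.Dict.get? pvSuccDict (pvSeason k)).getD "" = pvSeason (k + 1) := by
  have h : k % 3 = 0 ∨ k % 3 = 1 ∨ k % 3 = 2 := by omega
  rcases h with h | h | h <;>
    · have h1 : (k + 1) % 3 = (k % 3 + 1) % 3 := by omega
      simp [pvSeason, h, h1]; decide

lemma pvFold_snd (l : List (List String)) : ∀ (k : Nat) (acc : List String),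
    (l.foldl pvStep (acc, pvSeason k)).2 = pvSeason (k + l.length) := by
  induction l with
  | nil => intro k acc; simp
  | cons x t ih =>
      intro k acc
      have hs : pvStep (acc, pvSeason k) x = (acc ++ [pvSeason (k + 1)], pvSeason (k + 1)) := by
        simp [pvStep, pvSucc_season]
      simp only [List.foldl_cons, hs, ih (k + 1), List.length_cons]
      congr 1
      omega

lemma pvFold_last (l : List (List String)) : ∀ (acc : List String) (p : String), l ≠ [] →
    ((l.foldl pvStep (acc, p)).1).getLast? = some (l.foldl pvStep (acc, p)).2 := by
  induction l with
  | nil => intro _ _ h; exact absurd rfl h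
  | cons x t ih =>
      intro acc p _
      rcases t with _ | ⟨y, t'⟩
      · simp [pvStep]
      · exact ih _ _ (by simp)

lemma pv_lastType (schedule : List (List String)) (h : schedule ≠ []) :
    last_semester_type schedule = some (pvSeason schedule.length) := by
  have hl : 0 < schedule.length := List.length_pos_iff.mpr h
  have hseq : semester_type_sequence schedule = some (schedule.foldl pvStep ([], "Su")).1 := by
    simp [semester_type_sequence, schedule_length]
    omega
  have hsu : ("Su" : String) = pvSeason 0 := rfl
  simp only [last_semester_type, hseq, PySem.List.pyGet?_neg_one]
  rw [hsu, pvFold_last _ _ _ h, pvFold_snd]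
  simp

-- the three junior semesters flattened: schedule[m] ++ schedule[m+1] ++ schedule[m+2]
lemma pv_drop_take3 (s : List (List String)) (m : Nat) (h : m + 3 ≤ s.length) :
    (s.drop m).take 3 = [s[m], s[m + 1], s[m + 2]] := by
  have h1 : s.drop m = s[m] :: s.drop (m + 1) := List.drop_eq_getElem_cons (by omega)
  have h2 : s.drop (m + 1) = s[m + 1] :: s.drop (m + 2) := List.drop_eq_getElem_cons (by omega)
  have h3 : s.drop (m + 2) = s[m + 2] :: s.drop (m + 3) := List.drop_eq_getElem_cons (by omega)
  rw [h1, h2, h3]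
  rfl

-- the common closed form of both programs
def pvP (course : String) : Bool := PySem.Str.isIn " 1" course

def pvClosed (schedule : List (List String)) : Bool :=
  let n := schedule.length
  let senior := if n % 3 = 0 then 3 else if n % 3 = 2 then 2 else 1
  if n < senior + 3 then false
  else ((schedule.drop (n - senior - 3)).take 3).any (fun sem => sem.any pvP)

lemma pv_take3_any (s : List (List String)) (m : Nat) (h : m + 3 ≤ s.length) :
    ((s.drop m).take 3).any (fun sem => sem.any pvP) =
      ((s[m]'(by omega)).any pvP || ((s[m + 1]'(by omega)).any pvP || (s[m + 2]'(by omega)).any pvP)) := by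
  rw [pv_drop_take3 s m h]
  simp only [List.any_cons, List.any_nil, Bool.or_false]
  rfl

lemma pvClosed_eval (schedule : List (List String)) (sen : Nat)
    (hsen : (if schedule.length % 3 = 0 then 3 else if schedule.length % 3 = 2 then 2 else 1) = sen)
    (h : ¬ schedule.length < sen + 3) :
    pvClosed schedule =
      ((schedule.drop (schedule.length - sen - 3)).take 3).any (fun sem => sem.any pvP) := by
  simp only [pvClosed, hsen, if_neg h]

lemma pvClosed_small (schedule : List (List String)) (sen : Nat)
    (hsen : (if schedule.length % 3 = 0 then 3 else if schedule.length % 3 = 2 then 2 else 1) = sen)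
    (h : schedule.length < sen + 3) :
    pvClosed schedule = false := by
  simp only [pvClosed, hsen, if_pos h]

-- A's senior-scan on the truncated schedule, evaluated
lemma pvA_big (schedule : List (List String)) (je : Nat) (hje3 : je % 3 = 0)
    (h3 : 3 ≤ je) (hle : je ≤ schedule.length) :
    senior_year_semesters_list (some (schedule.take je)) =
      some ((schedule[je - 3]'(by omega)) ++ (schedule[je - 2]'(by omega)) ++ (schedule[je - 1]'(by omega))) := by
  set j := schedule.take je with hj
  have hjlen : j.length = je := by simp [hj]; omega
  have hjne : j ≠ [] := by
    intro hc; rw [hc] at hjlen; simp at hjlen; omega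
  have hg1 : (some j == (none : Option (List (List String)))) = false := by simp
  have hg2 : (some j == some ([] : List (List String))) = false := by
    simp; intro hc; exact hjne hc
  have hg3 : (some j == some ([[]] : List (List String))) = false := by
    simp; intro hc; rw [hc] at hjlen; simp at hjlen; omega
  have hlt : last_semester_type j = some "Su" := by
    rw [pv_lastType j hjne, hjlen]
    simp [pvSeason, hje3]
  have hsi : senior_interval j = some (-3) := by
    simp [senior_interval, hlt]
  have hrange : PySem.List.pyRange (-3) 0 1 = [-3, -2, -1] := by decide
  have hget : ∀ (k : Nat) (hk0 : 0 < k) (hk3 : k ≤ 3),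
      (PySem.List.pyGet? j (-(k : Int))).getD [] = schedule[je - k]'(by omega) := by
    intro k hk0 hk3
    rw [PySem.List.pyGet?_neg_natCast j k hk0 (by omega), hjlen,
        List.getElem?_eq_getElem (by omega)]
    simp only [Option.getD_some, hj]
    simp [List.getElem_take]
  have e3 := hget 3 (by omega) (by omega)
  have e2 := hget 2 (by omega) (by omega)
  have e1 := hget 1 (by omega) (by omega)
  simp only [senior_year_semesters_list, hg1, hg2, hg3, Bool.or_false,
    if_neg Bool.false_ne_true, Option.getD_some, hsi, hrange, List.foldl_cons, List.foldl_nil,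
    List.nil_append]
  norm_num at e3 e2 e1 ⊢
  rw [e3, e2, e1]

-- A's top level in the case where the junior interval is nonempty
lemma pvA_big2 (schedule : List (List String)) (sen : Nat) (hs1 : 1 ≤ sen)
    (hle : sen + 3 ≤ schedule.length)
    (hje3 : (schedule.length - sen) % 3 = 0)
    (hji : junior_interval schedule = some (schedule.take (schedule.length - sen))) :
    junior_with_1000_level_courses schedule =
      ((schedule.drop (schedule.length - sen - 3)).take 3).any (fun sem => sem.any pvP) := by
  have hnpos : (0 : Int) < (schedule.length : Int) := by exact_mod_cast (by omega : 0 < schedule.length)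
  simp only [junior_with_1000_level_courses, junior_year_semesters_list, schedule_length]
  rw [if_pos hnpos, hji,
      pvA_big schedule (schedule.length - sen) hje3 (by omega) (by omega),
      pv_take3_any schedule (schedule.length - sen - 3) (by omega)]
  have i1 : schedule.length - sen - 3 + 1 = schedule.length - sen - 2 := by omega
  have i2 : schedule.length - sen - 3 + 2 = schedule.length - sen - 1 := by omega
  simp only [i1, i2, List.any_append, Bool.or_assoc]
  rfl

-- A's top level in the case where junior_interval is None (A returns False)
lemma pvA_none (schedule : List (List String)) (h0 : schedule ≠ [])
    (hji : junior_interval schedule = none) :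
    junior_with_1000_level_courses schedule = false := by
  have hnpos : (0 : Int) < (schedule.length : Int) := by
    exact_mod_cast List.length_pos_iff.mpr h0
  simp only [junior_with_1000_level_courses, junior_year_semesters_list, schedule_length]
  rw [if_pos hnpos, hji]
  rfl

-- A's result, in closed form
lemma pvA_closed (schedule : List (List String)) :
    junior_with_1000_level_courses schedule = pvClosed schedule := by
  by_cases h0 : schedule = []
  · subst h0; rfl
  · have hnpos : 0 < schedule.length := List.length_pos_iff.mpr h0
    set n := schedule.length with hn
    have hlt : last_semester_type schedule = some (pvSeason n) := pv_lastType schedule h0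
    have hm : n % 3 = 0 ∨ n % 3 = 1 ∨ n % 3 = 2 := by omega
    rcases hm with hm | hm | hm
    · -- last type 'Su', senior = 3
      have hseason : pvSeason n = "Su" := by simp [pvSeason, hm]
      by_cases hbig : 3 < n
      · have h6 : 6 ≤ n := by omega
        have hji : junior_interval schedule = some (schedule.take (n - 3)) := by
          simp only [junior_interval, hlt, hseason, schedule_length, ← hn]
          rw [if_pos (by simp; omega)]
          congr 2
          have hc : (n : Int) - 3 = ((n - 3 : Nat) : Int) := by omega
          rw [hc, PySem.List.slice_to_natCast]
        rw [pvA_big2 schedule 3 (by omega) (by omega) (by omega) (by rw [← hn]; exact hji),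
            pvClosed_eval schedule 3 (by rw [← hn, hm]; norm_num) (by rw [← hn]; omega)]
      · have hn3 : n = 3 := by omega
        rw [hn3] at hlt
        have hji : junior_interval schedule = none := by
          simp [junior_interval, hlt, schedule_length, ← hn, hn3, pvSeason]
        rw [pvA_none schedule h0 hji,
            pvClosed_small schedule 3 (by rw [← hn, hm]; norm_num) (by rw [← hn]; omega)]
    · -- last type 'Fa', senior = 1
      have hseason : pvSeason n = "Fa" := by simp [pvSeason, hm]
      by_cases hbig : 1 < n
      · have h4 : 4 ≤ n := by omega
        have hji : junior_interval schedule = some (schedule.take (n - 1)) := by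
          simp only [junior_interval, hlt, hseason, schedule_length, ← hn]
          rw [if_neg (by simp), if_neg (by simp), if_pos (by simp; omega)]
          congr 2
          have hc : (n : Int) - 1 = ((n - 1 : Nat) : Int) := by omega
          rw [hc, PySem.List.slice_to_natCast]
        rw [pvA_big2 schedule 1 (by omega) (by omega) (by omega) (by rw [← hn]; exact hji),
            pvClosed_eval schedule 1 (by rw [← hn, hm]; norm_num) (by rw [← hn]; omega)]
      · have hn1 : n = 1 := by omega
        rw [hn1] at hlt
        have hji : junior_interval schedule = none := by
          simp [junior_interval, hlt, schedule_length, ← hn, hn1, pvSeason]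
        rw [pvA_none schedule h0 hji,
            pvClosed_small schedule 1 (by rw [← hn, hm]; norm_num) (by rw [← hn]; omega)]
    · -- last type 'Sp', senior = 2
      have hseason : pvSeason n = "Sp" := by simp [pvSeason, hm]
      by_cases hbig : 2 < n
      · have h5 : 5 ≤ n := by omega
        have hji : junior_interval schedule = some (schedule.take (n - 2)) := by
          simp only [junior_interval, hlt, hseason, schedule_length, ← hn]
          rw [if_neg (by simp), if_pos (by simp; omega)]
          congr 2
          have hc : (n : Int) - 2 = ((n - 2 : Nat) : Int) := by omega
          rw [hc, PySem.List.slice_to_natCast]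
        rw [pvA_big2 schedule 2 (by omega) (by omega) (by omega) (by rw [← hn]; exact hji),
            pvClosed_eval schedule 2 (by rw [← hn, hm]; norm_num) (by rw [← hn]; omega)]
      · have hn2 : n = 2 := by omega
        rw [hn2] at hlt
        have hji : junior_interval schedule = none := by
          simp [junior_interval, hlt, schedule_length, ← hn, hn2, pvSeason]
        rw [pvA_none schedule h0 hji,
            pvClosed_small schedule 2 (by rw [← hn, hm]; norm_num) (by rw [← hn]; omega)]

-- B's result, in closed form
lemma pvB_closed (schedule : List (List String)) :
    junior_with_1000_level_courses_alt schedule = pvClosed schedule := by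
  by_cases h0 : schedule = []
  · subst h0; rfl
  · have hnpos : 0 < schedule.length := List.length_pos_iff.mpr h0
    set n := schedule.length with hn
    have hne : schedule.isEmpty = false := by simp [h0]
    have hmod : PySem.Int.mod (n : Int) 3 = ((n % 3 : Nat) : Int) := by
      exact_mod_cast PySem.Int.mod_natCast n 3
    have hsen : ∃ (sen : Nat), 1 ≤ sen ∧ sen ≤ 3 ∧
        ((if PySem.Int.mod (n : Int) 3 == 0 then (3 : Int)
          else if PySem.Int.mod (n : Int) 3 == 2 then 2 else 1) = (sen : Int)) ∧
        ((if n % 3 = 0 then (3 : Nat) else if n % 3 = 2 then 2 else 1) = sen) := by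
      have hm : n % 3 = 0 ∨ n % 3 = 1 ∨ n % 3 = 2 := by omega
      rcases hm with hm | hm | hm
      · exact ⟨3, by omega, by omega, by rw [hmod, hm]; norm_num, by rw [hm]; norm_num⟩
      · exact ⟨1, by omega, by omega, by rw [hmod, hm]; norm_num, by rw [hm]; norm_num⟩
      · exact ⟨2, by omega, by omega, by rw [hmod, hm]; norm_num, by rw [hm]; norm_num⟩
    obtain ⟨sen, hs1, hs3, hsInt, hsNat⟩ := hsen
    simp only [junior_with_1000_level_courses_alt, hne, Bool.false_eq_true, if_false, ← hn,
      hsInt, pvClosed, hsNat]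
    by_cases hsmall : n < sen + 3
    · rw [if_pos (by omega), if_pos hsmall]
    · rw [if_neg (by omega), if_neg hsmall]
      have ha : (n : Int) - (sen : Int) - 3 = ((n - sen - 3 : Nat) : Int) := by omega
      have hb : (n : Int) - (sen : Int) = ((n - sen - 3 : Nat) : Int) + ((3 : Nat) : Int) := by omega
      rw [ha, hb, PySem.List.slice_natCast_add]
      rw [pv_take3_any schedule (n - sen - 3) (by omega)]
      rw [pv_drop_take3 schedule (n - sen - 3) (by omega)]
      simp only [List.any_cons, List.any_nil, Bool.or_false]
      rfl

-- ===== VERDICT (by name: the statement is the Claim_ definition above) =====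
theorem junior_with_1000_level_courses_spec : Claim_equal_junior_with_1000_level_courses := by
  intro schedule _
  unfold Spec_junior_with_1000_level_courses
  rw [pvA_closed, pvB_closed]
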